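-- pv_equiv track=rewrite | github.com/Corentin-Monsallier/Operations-Research-Project | stepping_stone_utils.py | _prefer_zero_on_minus
-- ===== SOURCE A (Python) =====
-- def _rotate_cycle(cycle, start_idx):
--     # "cycle" is stored in closed form:
--     # the last element repeats the first.
--     cells = cycle[:-1]
--
--     # We choose one new starting point.
--     rotated = cells[start_idx:] + cells[:start_idx]
--
--     # We close the cycle again.
--     return rotated + [rotated[0]]
--
-- def _prefer_zero_on_minus(proposal, cycle):
--     """
--     When we correct an already-basic cycle, we prefer an orientation that puts
--     a zero-valued edge on a '-' position so the cycle can be broken without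
--     changing the transported quantities.
--     """
--     cells = cycle[:-1]
--
--     for start_idx in range(len(cells)):
--         # We test each possible rotation of the cycle.
--         rotated = _rotate_cycle(cycle, start_idx)
--
--         # In one alternating cycle, the odd positions are '-' cells.
--         minus_cells = [rotated[k] for k in range(1, len(rotated) - 1, 2)]
--
--         # If one of these cells is already worth 0, this orientation is practical:
--         # it will make it possible to break the cycle without modifying the positive flows.
--         if any(proposal[i][j] == 0 for i, j in minus_cells):
--             return rotated
--
--     return cycle
-- ===== SOURCE B (Python) =====
-- def _close_cycle(cells, s):
--     rotated = cells[s:] + cells[:s]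
--     return rotated + [rotated[0]]
--
-- def _prefer_zero_on_minus(proposal, cycle):
--     # One pass: record the positions of zero-valued cells in cycle[:-1]; a
--     # rotation by s puts exactly the cells at odd offsets from s on the '-'
--     # positions, so the first working start index is always 0, 1 or 2,
--     # determined by the parities of the zero positions.
--     cells = cycle[:-1]
--     n = len(cells)
--     zero_idx = [k for k, (i, j) in enumerate(cells) if proposal[i][j] == 0]
--     has_odd = any(k % 2 == 1 for k in zero_idx)
--     has_even_pos = any(k % 2 == 0 and k > 0 for k in zero_idx)
--     has_zero0 = 0 in zero_idx
--     if n % 2 == 0: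
--         if has_odd:
--             return _close_cycle(cells, 0)
--         if has_even_pos or has_zero0:
--             return _close_cycle(cells, 1)
--         return cycle
--     if has_odd:
--         return _close_cycle(cells, 0)
--     if has_even_pos:
--         return _close_cycle(cells, 1)
--     if n >= 3 and has_zero0:
--         return _close_cycle(cells, 2)
--     return cycle
-- ===== Notes on version B (the rewrite author's own statement) =====
-- stated objective: faster
-- what changed: Instead of testing every rotation against its odd-position cells (quadratic), B scans the cycle once to collect the positions of zero-valued cells and picks the first working start index (always 0, 1 or 2) from the parities of those positions.
-- outside the precondition, e.g. on _prefer_zero_on_minus([[], [0]], [(0, 0), (1, 1)]): A returns [(0, 0), (1, 1)], B raises IndexError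
import Mathlib
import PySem

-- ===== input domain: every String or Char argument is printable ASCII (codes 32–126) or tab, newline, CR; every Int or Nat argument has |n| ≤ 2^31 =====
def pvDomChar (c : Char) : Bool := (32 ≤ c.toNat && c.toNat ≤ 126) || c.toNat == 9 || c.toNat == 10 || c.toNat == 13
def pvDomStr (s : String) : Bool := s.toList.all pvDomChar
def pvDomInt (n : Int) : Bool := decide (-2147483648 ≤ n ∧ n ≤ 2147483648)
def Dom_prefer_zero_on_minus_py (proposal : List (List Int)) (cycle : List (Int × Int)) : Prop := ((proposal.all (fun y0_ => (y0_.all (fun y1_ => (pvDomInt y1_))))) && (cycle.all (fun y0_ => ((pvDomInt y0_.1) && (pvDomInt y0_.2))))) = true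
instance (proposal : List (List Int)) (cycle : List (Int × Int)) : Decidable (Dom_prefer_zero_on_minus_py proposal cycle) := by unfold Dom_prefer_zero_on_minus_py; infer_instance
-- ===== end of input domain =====

-- B replaces A's try-every-rotation scan by one pass that records the positions of
-- zero-valued cells and derives the first working start index (always 0, 1 or 2)
-- from their parities; objective: faster (measured).


-- ===== PORT A =====
-- proposal[i][j] (two chained Python indexings; none = IndexError, excluded by Pre_)
def pvGet2 (proposal : List (List Int)) (c : Int × Int) : Option Int :=
  (PySem.List.pyGet? proposal c.1).bind (fun row => PySem.List.pyGet? row c.2)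

-- proposal[i][j] == 0
def pvIsZero (proposal : List (List Int)) (c : Int × Int) : Bool :=
  pvGet2 proposal c == some 0

-- _rotate_cycle; 'rotated[0]' on an empty rotation would be an IndexError in Python
-- (never reached from the loop below, which only rotates non-empty cell lists).
def pvRotateCycle (cycle : List (Int × Int)) (start_idx : Int) : List (Int × Int) :=
  let cells := PySem.List.slice cycle none (some (-1))
  let rotated := PySem.List.slice cells (some start_idx) none ++ PySem.List.slice cells none (some start_idx)
  match PySem.List.pyGet? rotated 0 with
  | some h => rotated ++ [h]
  | none => []

-- the 'for start_idx in range(len(cells))' loop of _prefer_zero_on_minus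
def pvLoopA (proposal : List (List Int)) (cycle : List (Int × Int)) : List Int → List (Int × Int)
  | [] => cycle
  | s :: rest =>
    let rotated := pvRotateCycle cycle s
    let minus_cells := (PySem.List.pyRange 1 ((rotated.length : Int) - 1) 2).map
        (fun k => PySem.List.pyGet? rotated k)
    if minus_cells.any (fun c? => c?.any (fun c => pvIsZero proposal c)) then rotated
    else pvLoopA proposal cycle rest

def prefer_zero_on_minus_py (proposal : List (List Int)) (cycle : List (Int × Int)) : List (Int × Int) :=
  let cells := PySem.List.slice cycle none (some (-1))
  pvLoopA proposal cycle (PySem.List.pyRange 0 (cells.length : Int) 1)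

-- ===== PORT B =====
-- _close_cycle of Source B
def pvClose (cells : List (Int × Int)) (s : Int) : List (Int × Int) :=
  let rotated := PySem.List.slice cells (some s) none ++ PySem.List.slice cells none (some s)
  match PySem.List.pyGet? rotated 0 with
  | some h => rotated ++ [h]
  | none => []

def prefer_zero_on_minus_py_alt (proposal : List (List Int)) (cycle : List (Int × Int)) : List (Int × Int) :=
  let cells := PySem.List.slice cycle none (some (-1))
  let zero_idx := ((PySem.List.enumerate cells).filter (fun kc => pvIsZero proposal kc.2)).map (fun kc => kc.1)
  let has_odd := zero_idx.any (fun k => PySem.Int.mod k 2 == 1)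
  let has_even_pos := zero_idx.any (fun k => PySem.Int.mod k 2 == 0 && decide ((0:Int) < k))
  let has_zero0 := zero_idx.contains 0
  if cells.length % 2 == 0 then
    if has_odd then pvClose cells 0
    else if has_even_pos || has_zero0 then pvClose cells 1
    else cycle
  else
    if has_odd then pvClose cells 0
    else if has_even_pos then pvClose cells 1
    else if decide (3 ≤ cells.length) && has_zero0 then pvClose cells 2
    else cycle

-- ===== PRECONDITION & SPEC =====
-- Pre_ excludes cycles containing a cell that does not index into proposal: on such
-- inputs Python A raises IndexError whenever the scan reaches that cell (it may still
-- return if a zero is found first), while B always raises since it scans every cell once.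
def Pre_prefer_zero_on_minus_py (proposal : List (List Int)) (cycle : List (Int × Int)) : Prop :=
  ∀ c ∈ cycle.dropLast,
    ((PySem.List.pyGet? proposal c.1).bind (fun row => PySem.List.pyGet? row c.2)).isSome = true
instance (proposal : List (List Int)) (cycle : List (Int × Int)) : Decidable (Pre_prefer_zero_on_minus_py proposal cycle) := by unfold Pre_prefer_zero_on_minus_py; infer_instance

def pvWitness_prefer_zero_on_minus_py : List (List Int) × (List (Int × Int)) :=
  ([[0, 1], [2, 0]], [(0, 1), (1, 1), (0, 1)])

def Spec_prefer_zero_on_minus_py (proposal : List (List Int)) (cycle : List (Int × Int)) (out : List (Int × Int)) : Prop := out = prefer_zero_on_minus_py_alt proposal cycle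
instance (proposal : List (List Int)) (cycle : List (Int × Int)) (out : List (Int × Int)) : Decidable (Spec_prefer_zero_on_minus_py proposal cycle out) := by unfold Spec_prefer_zero_on_minus_py; infer_instance

-- ===== CLAIM (what is proved, stated in full; the proofs are below) =====
def Claim_equal_prefer_zero_on_minus_py : Prop := ∀ (proposal : List (List Int)) (cycle : List (Int × Int)), Dom_prefer_zero_on_minus_py proposal cycle → Pre_prefer_zero_on_minus_py proposal cycle → Spec_prefer_zero_on_minus_py proposal cycle (prefer_zero_on_minus_py proposal cycle)

-- ===== LEMMAS AND PROOFS =====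

-- the cell of `cells` examined at position m (false where out of range)
def pvZAt (proposal : List (List Int)) (cells : List (Int × Int)) (m : Nat) : Bool :=
  cells[m]?.any (fun c => pvIsZero proposal c)

-- the zero-test A performs for one start index (the loop body's condition)
def pvCheck (proposal : List (List Int)) (cycle : List (Int × Int)) (s : Int) : Bool :=
  let rotated := pvRotateCycle cycle s
  ((PySem.List.pyRange 1 ((rotated.length : Int) - 1) 2).map
      (fun k => PySem.List.pyGet? rotated k)).any (fun c? => c?.any (fun c => pvIsZero proposal c))

lemma pvLoopA_cons (proposal : List (List Int)) (cycle : List (Int × Int)) (s : Int) (rest : List Int) :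
    pvLoopA proposal cycle (s :: rest) =
      if pvCheck proposal cycle s then pvRotateCycle cycle s else pvLoopA proposal cycle rest := rfl

lemma pvClose_eq_rot (cycle : List (Int × Int)) (s : Int) :
    pvClose cycle.dropLast s = pvRotateCycle cycle s := by
  unfold pvClose pvRotateCycle
  rw [PySem.List.slice_to_neg_one]

lemma pvRotate_eq (cycle : List (Int × Int)) (s : Nat) (hs : s < cycle.dropLast.length) :
    pvRotateCycle cycle (s : Int) =
      (cycle.dropLast.drop s ++ cycle.dropLast.take s) ++ [cycle.dropLast[s]] := by
  unfold pvRotateCycle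
  simp only [PySem.List.slice_to_neg_one, PySem.List.slice_from_natCast, PySem.List.slice_to_natCast]
  have h0 : PySem.List.pyGet? (cycle.dropLast.drop s ++ cycle.dropLast.take s) 0
      = some cycle.dropLast[s] := by
    rw [PySem.List.pyGet?_zero, List.getElem?_append,
      if_pos (by simp only [List.length_drop]; omega)]
    simp [List.getElem?_drop, List.getElem?_eq_getElem hs]
  rw [h0]

lemma rotcore_get (cells : List (Int × Int)) (s k : Nat) (hs : s < cells.length) (hk : k < cells.length) :
    (cells.drop s ++ cells.take s)[k]? = cells[(s + k) % cells.length]? := by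
  rw [List.getElem?_append]
  by_cases h : k < cells.length - s
  · rw [if_pos (by simp [List.length_drop]; omega)]
    rw [List.getElem?_drop]
    rw [Nat.mod_eq_of_lt (by omega)]
  · rw [if_neg (by simp [List.length_drop]; omega)]
    simp only [List.length_drop]
    rw [List.getElem?_take]
    rw [if_pos (by omega)]
    congr 1
    have h1 : (s + k) % cells.length = (s + k - cells.length) % cells.length :=
      (Nat.mod_eq_sub_mod (by omega))
    rw [h1, Nat.mod_eq_of_lt (by omega)]
    omega

lemma pvCheck_iff (proposal : List (List Int)) (cycle : List (Int × Int)) (s : Nat)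
    (hs : s < cycle.dropLast.length) :
    pvCheck proposal cycle (s : Int) = true ↔
      ∃ k, k < cycle.dropLast.length ∧ k % 2 = 1 ∧
        pvZAt proposal cycle.dropLast ((s + k) % cycle.dropLast.length) = true := by
  have hrot := pvRotate_eq cycle s hs
  simp only [pvCheck, hrot]
  set cells := cycle.dropLast with hcells
  set n := cells.length with hn
  set core := cells.drop s ++ cells.take s with hcore
  have hlencore : core.length = n := by simp [hcore]; omega
  have hlen : (((core ++ [cells[s]]).length : Int)) - 1 = (n : Int) := by
    simp [hlencore]
  rw [hlen, List.any_map, List.any_eq_true]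
  have hget : ∀ k : Nat, k < n →
      PySem.List.pyGet? (core ++ [cells[s]]) (k : Int) = cells[(s + k) % n]? := by
    intro k hk
    rw [PySem.List.pyGet?_of_nonneg _ (by omega)]
    rw [List.getElem?_append, if_pos (by rw [hlencore]; simpa using hk)]
    simpa using rotcore_get cells s k hs hk
  constructor
  · rintro ⟨x, hx, hpx⟩
    rw [PySem.List.mem_pyRange_iff_of_pos (by norm_num)] at hx
    obtain ⟨hx1, hx2, c, hc⟩ := hx
    refine ⟨x.toNat, by omega, by omega, ?_⟩
    simp only [Function.comp] at hpx
    have hxx : (x.toNat : Int) = x := by omega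
    rw [← hxx, hget x.toNat (by omega)] at hpx
    exact hpx
  · rintro ⟨k, hk, hk2, hz⟩
    refine ⟨(k : Int), ?_, ?_⟩
    · rw [PySem.List.mem_pyRange_iff_of_pos (by norm_num)]
      exact ⟨by omega, by omega, ⟨((k:Int) - 1)/2, by omega⟩⟩
    · simp only [Function.comp]
      rw [hget k hk]
      exact hz

lemma pvLoopA_all_false (proposal : List (List Int)) (cycle : List (Int × Int)) (l : List Int)
    (h : ∀ s ∈ l, pvCheck proposal cycle s = false) :
    pvLoopA proposal cycle l = cycle := by
  induction l with
  | nil => rfl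
  | cons s rest ih =>
    rw [pvLoopA_cons, if_neg (by simp [h s (List.mem_cons_self)]), ih (fun t ht => h t (List.mem_cons_of_mem _ ht))]

lemma pvLoopA_skip (proposal : List (List Int)) (cycle : List (Int × Int)) (l1 l2 : List Int)
    (h : ∀ s ∈ l1, pvCheck proposal cycle s = false) :
    pvLoopA proposal cycle (l1 ++ l2) = pvLoopA proposal cycle l2 := by
  induction l1 with
  | nil => rfl
  | cons s rest ih =>
    rw [List.cons_append, pvLoopA_cons, if_neg (by simp [h s (List.mem_cons_self)]),
      ih (fun t ht => h t (List.mem_cons_of_mem _ ht))]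

lemma loop_ret (proposal : List (List Int)) (cycle : List (Int × Int)) (s : Nat)
    (hs : s < cycle.dropLast.length)
    (hfalse : ∀ t : Nat, t < s → pvCheck proposal cycle (t : Int) = false)
    (htrue : pvCheck proposal cycle (s : Int) = true) :
    pvLoopA proposal cycle (PySem.List.pyRange 0 (cycle.dropLast.length : Int) 1) =
      pvRotateCycle cycle (s : Int) := by
  rw [PySem.List.pyRange_one_append 0 (s : Int) (cycle.dropLast.length : Int) (by omega) (by omega)]
  rw [pvLoopA_skip _ _ _ _ ?side]
  case side =>
    intro t ht
    rw [PySem.List.mem_pyRange_one] at ht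
    have : t = ((t.toNat : Nat) : Int) := by omega
    rw [this]
    exact hfalse t.toNat (by omega)
  rw [PySem.List.pyRange_one_cons (by omega), pvLoopA_cons, if_pos htrue]

lemma zi_any_iff (proposal : List (List Int)) (cells : List (Int × Int)) (p : Int → Bool) :
    ((((PySem.List.enumerate cells).filter (fun kc => pvIsZero proposal kc.2)).map (fun kc => kc.1)).any p = true)
      ↔ ∃ m : Nat, ∃ _h : m < cells.length, pvIsZero proposal cells[m] = true ∧ p (m : Int) = true := by
  rw [List.any_map, List.any_filter, List.any_eq_true]
  constructor
  · rintro ⟨q, hq, hpq⟩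
    rw [PySem.List.mem_enumerate_iff] at hq
    obtain ⟨m, hm, rfl⟩ := hq
    simp only [Function.comp, Bool.and_eq_true] at hpq
    exact ⟨m, hm, hpq.1, by simpa using hpq.2⟩
  · rintro ⟨m, hm, hz, hp⟩
    refine ⟨((0:Int) + m, cells[m]), (PySem.List.mem_enumerate_iff cells 0 _).mpr ⟨m, hm, rfl⟩, ?_⟩
    simp only [Function.comp, Bool.and_eq_true]
    exact ⟨hz, by simpa using hp⟩

lemma pvZAt_of_lt (proposal : List (List Int)) (cells : List (Int × Int)) (m : Nat)
    (h : m < cells.length) : pvZAt proposal cells m = pvIsZero proposal cells[m] := by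
  simp [pvZAt, List.getElem?_eq_getElem h]

lemma flag_odd_iff (proposal : List (List Int)) (cells : List (Int × Int)) :
    ((((PySem.List.enumerate cells).filter (fun kc => pvIsZero proposal kc.2)).map (fun kc => kc.1)).any
        (fun k => PySem.Int.mod k 2 == 1) = true)
      ↔ ∃ m, m < cells.length ∧ m % 2 = 1 ∧ pvZAt proposal cells m = true := by
  rw [zi_any_iff]
  constructor
  · rintro ⟨m, hm, hz, hp⟩
    refine ⟨m, hm, ?_, by rw [pvZAt_of_lt _ _ _ hm]; exact hz⟩
    simp at hp
    omega
  · rintro ⟨m, hm, hm2, hz⟩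
    refine ⟨m, hm, by rw [pvZAt_of_lt _ _ _ hm] at hz; exact hz, ?_⟩
    simp
    omega

lemma flag_evenpos_iff (proposal : List (List Int)) (cells : List (Int × Int)) :
    ((((PySem.List.enumerate cells).filter (fun kc => pvIsZero proposal kc.2)).map (fun kc => kc.1)).any
        (fun k => PySem.Int.mod k 2 == 0 && decide ((0:Int) < k)) = true)
      ↔ ∃ m, m < cells.length ∧ m % 2 = 0 ∧ 0 < m ∧ pvZAt proposal cells m = true := by
  rw [zi_any_iff]
  constructor
  · rintro ⟨m, hm, hz, hp⟩
    simp at hp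
    exact ⟨m, hm, by omega, by omega, by rw [pvZAt_of_lt _ _ _ hm]; exact hz⟩
  · rintro ⟨m, hm, hm2, hmpos, hz⟩
    refine ⟨m, hm, by rw [pvZAt_of_lt _ _ _ hm] at hz; exact hz, ?_⟩
    simp
    omega

lemma flag_zero0_iff (proposal : List (List Int)) (cells : List (Int × Int)) :
    ((((PySem.List.enumerate cells).filter (fun kc => pvIsZero proposal kc.2)).map (fun kc => kc.1)).contains 0 = true)
      ↔ (0 < cells.length ∧ pvZAt proposal cells 0 = true) := by
  rw [List.contains_iff_mem]
  constructor
  · intro h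
    obtain ⟨kc, hkc, hfst⟩ := List.mem_map.mp h
    obtain ⟨hmem, hp⟩ := List.mem_filter.mp hkc
    obtain ⟨m, hm, rfl⟩ := (PySem.List.mem_enumerate_iff cells 0 kc).mp hmem
    have hm0 : m = 0 := by simp at hfst; omega
    subst hm0
    refine ⟨by omega, ?_⟩
    simp only [pvZAt, List.getElem?_eq_getElem hm, Option.any_some]
    exact hp
  · rintro ⟨hn, hz⟩
    refine List.mem_map.mpr ⟨((0:Int) + (0:Nat), cells[0]), ?_, by simp⟩
    refine List.mem_filter.mpr ⟨(PySem.List.mem_enumerate_iff cells 0 _).mpr ⟨0, hn, rfl⟩, ?_⟩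
    simpa [pvZAt, List.getElem?_eq_getElem hn] using hz

-- check at start index 0 fails when no zero cell sits at an odd position
lemma check0_false (proposal : List (List Int)) (cycle : List (Int × Int))
    (h0 : 0 < cycle.dropLast.length)
    (hHO : ¬ ∃ m, m < cycle.dropLast.length ∧ m % 2 = 1 ∧ pvZAt proposal cycle.dropLast m = true) :
    pvCheck proposal cycle ((0 : Nat) : Int) = false := by
  cases hb : pvCheck proposal cycle ((0 : Nat) : Int) with
  | false => rfl
  | true =>
    obtain ⟨k, hk, hk2, hz⟩ := (pvCheck_iff proposal cycle 0 h0).mp hb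
    rw [Nat.zero_add, Nat.mod_eq_of_lt hk] at hz
    exact (hHO ⟨k, hk, hk2, hz⟩).elim

-- for odd length, check at start index 1 fails when the only zero cell is at position 0
lemma check1_false_odd (proposal : List (List Int)) (cycle : List (Int × Int))
    (h1 : 1 < cycle.dropLast.length) (hpar : cycle.dropLast.length % 2 = 1)
    (hHO : ¬ ∃ m, m < cycle.dropLast.length ∧ m % 2 = 1 ∧ pvZAt proposal cycle.dropLast m = true)
    (hHE : ¬ ∃ m, m < cycle.dropLast.length ∧ m % 2 = 0 ∧ 0 < m ∧ pvZAt proposal cycle.dropLast m = true) :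
    pvCheck proposal cycle ((1 : Nat) : Int) = false := by
  cases hb : pvCheck proposal cycle ((1 : Nat) : Int) with
  | false => rfl
  | true =>
    obtain ⟨k, hk, hk2, hz⟩ := (pvCheck_iff proposal cycle 1 (by omega)).mp hb
    have hmlt : (1 + k) % cycle.dropLast.length < cycle.dropLast.length := Nat.mod_lt _ (by omega)
    by_cases hm2 : (1 + k) % cycle.dropLast.length % 2 = 1
    · exact (hHO ⟨_, hmlt, hm2, hz⟩).elim
    · by_cases hmp : 0 < (1 + k) % cycle.dropLast.length
      · exact (hHE ⟨_, hmlt, by omega, hmp, hz⟩).elim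
      · have hm0 : (1 + k) % cycle.dropLast.length = 0 := by omega
        rcases (by omega : 1 + k < cycle.dropLast.length ∨ 1 + k = cycle.dropLast.length) with hlt | heq
        · rw [Nat.mod_eq_of_lt hlt] at hm0
          omega
        · omega

-- if no cell of the open cycle is zero, the whole loop falls through
lemma all_checks_false (proposal : List (List Int)) (cycle : List (Int × Int))
    (hz : ∀ m, m < cycle.dropLast.length → pvZAt proposal cycle.dropLast m = false) :
    pvLoopA proposal cycle (PySem.List.pyRange 0 (cycle.dropLast.length : Int) 1) = cycle := by
  apply pvLoopA_all_false
  intro t ht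
  rw [PySem.List.mem_pyRange_one] at ht
  have htn : t = ((t.toNat : Nat) : Int) := by omega
  rw [htn]
  cases hb : pvCheck proposal cycle ((t.toNat : Nat) : Int) with
  | false => rfl
  | true =>
    obtain ⟨k, hk, hk2, hzk⟩ := (pvCheck_iff proposal cycle t.toNat (by omega)).mp hb
    rw [hz _ (Nat.mod_lt _ (by omega))] at hzk
    cases hzk

-- ===== VERDICT (by name: the statement is the Claim_ definition above) =====
theorem prefer_zero_on_minus_py_spec : Claim_equal_prefer_zero_on_minus_py := by
  intro proposal cycle _hdom _hpre
  unfold Spec_prefer_zero_on_minus_py prefer_zero_on_minus_py prefer_zero_on_minus_py_alt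
  simp only [PySem.List.slice_to_neg_one]
  by_cases hHO : ∃ m, m < cycle.dropLast.length ∧ m % 2 = 1 ∧ pvZAt proposal cycle.dropLast m = true
  · -- a zero cell at an odd position: both sides rotate by 0
    obtain ⟨m, hm, hm2, hz⟩ := hHO
    have hret : pvLoopA proposal cycle (PySem.List.pyRange 0 (cycle.dropLast.length : Int) 1) =
        pvRotateCycle cycle ((0 : Nat) : Int) := by
      refine loop_ret proposal cycle 0 (by omega) (fun t ht => absurd ht (by omega)) ?_
      refine (pvCheck_iff proposal cycle 0 (by omega)).mpr ⟨m, hm, hm2, ?_⟩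
      rw [Nat.zero_add, Nat.mod_eq_of_lt hm]
      exact hz
    have hoT := (flag_odd_iff proposal cycle.dropLast).mpr ⟨m, hm, hm2, hz⟩
    by_cases hpar : cycle.dropLast.length % 2 = 0
    · rw [if_pos (by simpa using hpar), if_pos hoT, pvClose_eq_rot]
      simpa using hret
    · rw [if_neg (by simpa using hpar), if_pos hoT, pvClose_eq_rot]
      simpa using hret
  · have hoF : ¬ ((((PySem.List.enumerate cycle.dropLast).filter (fun kc => pvIsZero proposal kc.2)).map (fun kc => kc.1)).any
        (fun k => PySem.Int.mod k 2 == 1) = true) := fun h => hHO ((flag_odd_iff proposal cycle.dropLast).mp h)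
    by_cases hHE : ∃ m, m < cycle.dropLast.length ∧ m % 2 = 0 ∧ 0 < m ∧ pvZAt proposal cycle.dropLast m = true
    · -- no odd-position zero, but an even-position one (not position 0): rotate by 1
      obtain ⟨m, hm, hm2, hmp, hz⟩ := hHE
      have hret : pvLoopA proposal cycle (PySem.List.pyRange 0 (cycle.dropLast.length : Int) 1) =
          pvRotateCycle cycle ((1 : Nat) : Int) := by
        refine loop_ret proposal cycle 1 (by omega) ?_ ?_
        · intro t ht
          have ht0 : t = 0 := by omega
          subst ht0
          exact check0_false proposal cycle (by omega) hHO
        · refine (pvCheck_iff proposal cycle 1 (by omega)).mpr ⟨m - 1, by omega, by omega, ?_⟩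
          rw [show 1 + (m - 1) = m from by omega, Nat.mod_eq_of_lt hm]
          exact hz
      have heT := (flag_evenpos_iff proposal cycle.dropLast).mpr ⟨m, hm, hm2, hmp, hz⟩
      by_cases hpar : cycle.dropLast.length % 2 = 0
      · rw [if_pos (by simpa using hpar), if_neg hoF,
          if_pos (by rw [Bool.or_eq_true]; exact Or.inl heT), pvClose_eq_rot]
        simpa using hret
      · rw [if_neg (by simpa using hpar), if_neg hoF, if_pos heT, pvClose_eq_rot]
        simpa using hret
    · have heF : ¬ ((((PySem.List.enumerate cycle.dropLast).filter (fun kc => pvIsZero proposal kc.2)).map (fun kc => kc.1)).any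
          (fun k => PySem.Int.mod k 2 == 0 && decide ((0:Int) < k)) = true) :=
        fun h => hHE ((flag_evenpos_iff proposal cycle.dropLast).mp h)
      by_cases hz0 : pvZAt proposal cycle.dropLast 0 = true
      · by_cases hpar : cycle.dropLast.length % 2 = 0
        · -- even length, zero only at position 0: rotate by 1
          by_cases h0n : 0 < cycle.dropLast.length
          · have hret : pvLoopA proposal cycle (PySem.List.pyRange 0 (cycle.dropLast.length : Int) 1) =
                pvRotateCycle cycle ((1 : Nat) : Int) := by
              refine loop_ret proposal cycle 1 (by omega) ?_ ?_
              · intro t ht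
                have ht0 : t = 0 := by omega
                subst ht0
                exact check0_false proposal cycle (by omega) hHO
              · refine (pvCheck_iff proposal cycle 1 (by omega)).mpr
                  ⟨cycle.dropLast.length - 1, by omega, by omega, ?_⟩
                rw [show 1 + (cycle.dropLast.length - 1) = cycle.dropLast.length from by omega,
                  Nat.mod_self]
                exact hz0
            have hA := (flag_zero0_iff proposal cycle.dropLast).mpr ⟨h0n, hz0⟩
            rw [if_pos (by simpa using hpar), if_neg hoF,
              if_pos (by simp only [Bool.or_eq_true]; exact Or.inr hA),
              pvClose_eq_rot]
            simpa using hret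
          · -- impossible: pvZAt at 0 of an empty list
            have hnil : cycle.dropLast = [] := List.length_eq_zero_iff.mp (by omega)
            rw [pvZAt, hnil] at hz0
            simp at hz0
        · -- odd length, zero only at position 0
          by_cases h3 : 3 ≤ cycle.dropLast.length
          · -- rotate by 2
            have hret : pvLoopA proposal cycle (PySem.List.pyRange 0 (cycle.dropLast.length : Int) 1) =
                pvRotateCycle cycle ((2 : Nat) : Int) := by
              refine loop_ret proposal cycle 2 (by omega) ?_ ?_
              · intro t ht
                rcases (by omega : t = 0 ∨ t = 1) with ht0 | ht1
                · subst ht0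
                  exact check0_false proposal cycle (by omega) hHO
                · subst ht1
                  exact check1_false_odd proposal cycle (by omega) (by omega) hHO hHE
              · refine (pvCheck_iff proposal cycle 2 (by omega)).mpr
                  ⟨cycle.dropLast.length - 2, by omega, by omega, ?_⟩
                rw [show 2 + (cycle.dropLast.length - 2) = cycle.dropLast.length from by omega,
                  Nat.mod_self]
                exact hz0
            have hB := (flag_zero0_iff proposal cycle.dropLast).mpr ⟨by omega, hz0⟩
            rw [if_neg (by simpa using hpar), if_neg hoF, if_neg heF,
              if_pos (by simp only [Bool.and_eq_true]; exact ⟨decide_eq_true h3, hB⟩),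
              pvClose_eq_rot]
            simpa using hret
          · -- length is 1: no '-' position at all, A falls through
            have h1 : cycle.dropLast.length = 1 := by
              by_contra hne
              have h0n : 0 < cycle.dropLast.length := by
                by_contra h0n
                have hnil : cycle.dropLast = [] := List.length_eq_zero_iff.mp (by omega)
                rw [pvZAt, hnil] at hz0
                simp at hz0
              omega
            rw [if_neg (by simpa using hpar), if_neg hoF, if_neg heF,
              if_neg (by simp only [Bool.and_eq_true]; rintro ⟨hd, -⟩; exact h3 (of_decide_eq_true hd))]
            apply pvLoopA_all_false
            intro t ht
            rw [PySem.List.mem_pyRange_one, h1] at ht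
            have htn : t = ((0 : Nat) : Int) := by omega
            rw [htn]
            cases hb : pvCheck proposal cycle ((0 : Nat) : Int) with
            | false => rfl
            | true =>
              obtain ⟨k, hk, hk2, -⟩ := (pvCheck_iff proposal cycle 0 (by omega)).mp hb
              omega
      · -- no zero cell anywhere: both sides return the cycle unchanged
        have hzall : ∀ m, m < cycle.dropLast.length → pvZAt proposal cycle.dropLast m = false := by
          intro m hm
          cases hzb : pvZAt proposal cycle.dropLast m with
          | false => rfl
          | true =>
            by_cases hm2 : m % 2 = 1
            · exact (hHO ⟨m, hm, hm2, hzb⟩).elim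
            · by_cases hmp : 0 < m
              · exact (hHE ⟨m, hm, by omega, hmp, hzb⟩).elim
              · have hm0 : m = 0 := by omega
                subst hm0
                exact (hz0 hzb).elim
        have hret := all_checks_false proposal cycle hzall
        have hzF := fun h => hz0 ((flag_zero0_iff proposal cycle.dropLast).mp h).2
        by_cases hpar : cycle.dropLast.length % 2 = 0
        · rw [if_pos (by simpa using hpar), if_neg hoF,
            if_neg (by rw [Bool.or_eq_true]; rintro (h | h); exact heF h; exact hzF h)]
          exact hret
        · rw [if_neg (by simpa using hpar), if_neg hoF, if_neg heF,
            if_neg (by rw [Bool.and_eq_true]; rintro ⟨-, h⟩; exact hzF h)]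
          exact hret
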